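-- pv_equiv track=rewrite | github.com/Jyothishkumarav/python_ds_algo | ds/tree/deque.py | sliding_window_deque
-- ===== SOURCE A (Python) =====
-- from collections import deque
--
-- def sliding_window_deque(arr, k):
--     """
--     Implements a sliding window using a deque.
--
--     Args:
--         arr: The input list or array.
--         k: The size of the window.
--
--     Returns:
--         A list of results for each window (e.g., max, min, sum).
--         This example will return a list of deques representing each window.
--     """
--     if not arr or k <= 0 or k > len(arr):
--         return []  # Or raise an error, depending on desired behavior
--
--     result = []
--     window = deque()
--
--     for i in range(len(arr)):
--         # Add the current element to the window
--         window.append(arr[i])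
--
--         # If the window has reached its desired size 'k'
--         if len(window) == k:
--             # Process the current window (e.g., find max, min, sum)
--             # For this example, we'll just add a copy of the window to results
--             result.append(list(window.copy())) # Storing a copy
--
--             # Slide the window: remove the element from the left
--             window.popleft()
--
--     return result
-- ===== SOURCE B (Python) =====
-- def sliding_window_deque(arr, k):
--     if not arr or k <= 0 or k > len(arr):
--         return []
--     return [list(arr[i:i + k]) for i in range(len(arr) - k + 1)]
-- ===== Notes on version B (the rewrite author's own statement) =====
-- stated objective: simpler
-- what changed: Drops the maintained deque/append/popleft loop entirely and builds each window independently by a random-access slice arr[i:i+k] over the window start indices.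
import Mathlib
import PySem

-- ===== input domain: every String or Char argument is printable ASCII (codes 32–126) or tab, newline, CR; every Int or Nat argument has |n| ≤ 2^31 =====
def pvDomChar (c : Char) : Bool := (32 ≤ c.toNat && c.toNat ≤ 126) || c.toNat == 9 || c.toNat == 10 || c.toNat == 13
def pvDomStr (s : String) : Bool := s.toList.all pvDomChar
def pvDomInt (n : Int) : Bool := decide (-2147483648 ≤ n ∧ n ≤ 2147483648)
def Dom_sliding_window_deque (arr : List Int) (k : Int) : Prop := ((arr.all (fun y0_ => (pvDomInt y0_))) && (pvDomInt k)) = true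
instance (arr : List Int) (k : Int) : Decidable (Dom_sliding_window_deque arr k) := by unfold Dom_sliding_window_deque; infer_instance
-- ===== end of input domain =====

-- B drops A's maintained deque loop and builds each window independently by slicing; proved equal on all inputs.


-- ===== PORT A =====
-- A-side helper: one iteration of A's loop (append to the deque; emit+popleft at size k)
def pvStep (k : Int) (s : List (List Int) × List Int) (x : Int) : List (List Int) × List Int :=
  let w := s.2 ++ [x]
  if (w.length : Int) = k then (s.1 ++ [w], w.tail) else (s.1, w)

def sliding_window_deque (arr : List Int) (k : Int) : List (List Int) :=
  if arr = [] ∨ k ≤ 0 ∨ k > (arr.length : Int) then []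
  else
    ((PySem.List.pyRange 0 (arr.length : Int) 1).foldl
      (fun s i => pvStep k s (PySem.List.pyGetD arr i 0)) ([], [])).1

-- ===== PORT B =====
def sliding_window_deque_alt (arr : List Int) (k : Int) : List (List Int) :=
  if arr = [] ∨ k ≤ 0 ∨ k > (arr.length : Int) then []
  else
    (PySem.List.pyRange 0 ((arr.length : Int) - k + 1) 1).map
      (fun i => PySem.List.slice arr (some i) (some (i + k)))

-- ===== PRECONDITION & SPEC =====
def Spec_sliding_window_deque (arr : List Int) (k : Int) (out : List (List Int)) : Prop := out = sliding_window_deque_alt arr k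
instance (arr : List Int) (k : Int) (out : List (List Int)) : Decidable (Spec_sliding_window_deque arr k out) := by unfold Spec_sliding_window_deque; infer_instance

-- ===== CLAIM (what is proved, stated in full; the proofs are below) =====
def Claim_equal_sliding_window_deque : Prop := ∀ (arr : List Int) (k : Int), Dom_sliding_window_deque arr k → Spec_sliding_window_deque arr k (sliding_window_deque arr k)

-- ===== LEMMAS AND PROOFS =====

-- The loop state A maintains after consuming a prefix p: (windows emitted so far, current deque).
def pvWState (kn : Nat) (p : List Int) : List (List Int) × List Int :=
  ((List.range (p.length + 1 - kn)).map (fun i => (p.drop i).take kn),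
   if p.length + 1 ≤ kn then p else p.drop (p.length + 1 - kn))

theorem pvFold_eq_wstate (kn : Nat) (hk : 1 ≤ kn) (p : List Int) :
    p.foldl (pvStep (kn : Int)) ([], []) = pvWState kn p := by
  induction p using List.reverseRecOn with
  | nil =>
      simp [pvWState, Nat.sub_eq_zero_of_le hk]
  | append_singleton p x ih =>
      rw [List.foldl_append, ih]
      simp only [List.foldl_cons, List.foldl_nil, pvStep, pvWState, List.length_append,
        List.length_cons, List.length_nil]
      by_cases hle : p.length + 1 ≤ kn
      · rw [if_pos hle]
        split_ifs with h1 h2 h2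
        · exfalso; push_cast at h1; omega
        · -- the window just reached size kn: first emitted window
          push_cast at h1
          rw [show p.length + 1 - kn = 0 by omega, show p.length + (0 + 1) + 1 - kn = 1 by omega]
          simp only [List.range_zero, List.map_nil, List.nil_append, List.range_one,
            List.map_cons, List.map_nil, List.drop_zero, Prod.mk.injEq]
          constructor
          · rw [List.take_of_length_le (by simp; omega)]
          · exact List.drop_one.symm
        · -- growing phase: nothing emitted yet
          push_cast at h1
          rw [show p.length + 1 - kn = 0 by omega, show p.length + (0 + 1) + 1 - kn = 0 by omega]
          simp
        · exfalso; push_cast at h1; omega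
      · rw [if_neg hle]
        have h3 : kn ≤ p.length := by omega
        have hdlen : (p.drop (p.length + 1 - kn)).length = kn - 1 := by simp; omega
        have hnew : p.drop (p.length + 1 - kn) ++ [x] = (p ++ [x]).drop (p.length + 1 - kn) := by
          rw [List.drop_append_of_le_length (by omega)]
        split_ifs with h1 h2 h2
        · exfalso; omega
        · -- steady state: the deque held the last kn-1 elements of p
          rw [show p.length + (0 + 1) + 1 - kn = (p.length + 1 - kn) + 1 by omega,
            List.range_succ, List.map_append]
          simp only [Prod.mk.injEq]
          constructor
          · congr 1
            · apply List.map_congr_left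
              intro i hi
              simp only [List.mem_range] at hi
              rw [List.drop_append_of_le_length (by omega),
                  List.take_append_of_le_length (by simp; omega)]
            · simp only [List.map_cons, List.map_nil, hnew]
              rw [List.take_of_length_le (by simp; omega)]
          · rw [hnew, List.tail_drop]
        · exfalso; rw [hdlen] at h1; push_cast at h1; omega
        · exfalso; rw [hdlen] at h1; push_cast at h1; omega

theorem pvAlt_windows (arr : List Int) (k : Int) (hk : 0 < k) (hle : k ≤ (arr.length : Int)) :
    (PySem.List.pyRange 0 ((arr.length : Int) - k + 1) 1).map
      (fun i => PySem.List.slice arr (some i) (some (i + k)))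
      = (List.range (arr.length + 1 - k.toNat)).map (fun i => (arr.drop i).take k.toNat) := by
  rw [PySem.List.pyRange_one]
  rw [List.map_map]
  have hlen : ((arr.length : Int) - k + 1 - 0).toNat = arr.length + 1 - k.toNat := by omega
  rw [hlen]
  apply List.map_congr_left
  intro i hi
  simp only [List.mem_range] at hi
  simp only [Function.comp_apply, zero_add]
  rw [PySem.List.slice_toNat arr (by omega) (by omega)]
  congr 1
  omega

-- ===== VERDICT (by name: the statement is the Claim_ definition above) =====
theorem sliding_window_deque_spec : Claim_equal_sliding_window_deque := by
  intro arr k _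
  unfold Spec_sliding_window_deque sliding_window_deque sliding_window_deque_alt
  by_cases hg : arr = [] ∨ k ≤ 0 ∨ k > (arr.length : Int)
  · simp [hg]
  · rw [if_neg hg, if_neg hg]
    push Not at hg
    obtain ⟨hne, hk, hle⟩ := hg
    have hk' : (k.toNat : Int) = k := by omega
    rw [PySem.List.foldl_pyRange_zero_pyGetD' arr 0 (pvStep k) ([], [])]
    rw [pvAlt_windows arr k hk hle]
    have := pvFold_eq_wstate k.toNat (by omega) arr
    rw [hk'] at this
    rw [this]
    simp [pvWState]
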